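-- pv_equiv track=rewrite | github.com/hanvu04012005/PROJECT-XLA | 2+.py | dfs
-- ===== SOURCE A (Python) =====
-- def dfs(graph, start, goal):
--     stack = [(start, [start])]
--     visited = set()
--     count = 0
--     while stack:
--         node, path = stack.pop()
--         if node in visited:
--             continue
--         visited.add(node)
--         count += 1
--         if node == goal:
--             return path, count
--         for neighbor, _ in reversed(graph.get(node, [])):
--             if neighbor not in visited:
--                 stack.append((neighbor, path + [neighbor]))
--     return None, count
-- ===== SOURCE B (Python) =====
-- def dfs(graph, start, goal):
--     # Backtracking DFS: one shared path list plus a stack of neighbor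
--     # iterators, instead of copying the whole path into every stack entry.
--     visited = {start}
--     count = 1
--     path = [start]
--     if start == goal:
--         return path, count
--     frames = [iter(graph.get(start, []))]
--     while frames:
--         nxt = next(frames[-1], None)
--         if nxt is None:
--             frames.pop()
--             path.pop()
--             continue
--         neighbor = nxt[0]
--         if neighbor in visited:
--             continue
--         visited.add(neighbor)
--         count += 1
--         path.append(neighbor)
--         if neighbor == goal:
--             return path, count
--         frames.append(iter(graph.get(neighbor, [])))
--     return None, count
-- ===== Notes on version B (the rewrite author's own statement) =====
-- stated objective: alternative
-- what changed: A copies the whole path into every stack entry and filters neighbours at push time; B keeps one shared backtracking path plus a stack of remaining-neighbour iterators, checking visited at expansion time.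
import Mathlib
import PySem

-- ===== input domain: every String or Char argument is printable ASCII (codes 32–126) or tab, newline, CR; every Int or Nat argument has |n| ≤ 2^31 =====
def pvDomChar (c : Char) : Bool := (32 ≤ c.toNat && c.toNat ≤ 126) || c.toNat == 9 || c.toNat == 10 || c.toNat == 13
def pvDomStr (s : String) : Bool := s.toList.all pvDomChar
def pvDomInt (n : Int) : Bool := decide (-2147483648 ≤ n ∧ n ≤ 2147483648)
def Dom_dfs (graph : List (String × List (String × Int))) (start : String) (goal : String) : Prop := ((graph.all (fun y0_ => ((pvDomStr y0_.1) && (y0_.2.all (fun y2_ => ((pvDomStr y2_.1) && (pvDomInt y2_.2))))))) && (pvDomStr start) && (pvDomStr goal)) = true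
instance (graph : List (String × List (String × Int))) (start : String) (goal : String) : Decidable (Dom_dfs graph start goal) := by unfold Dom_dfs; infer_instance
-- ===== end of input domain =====

-- B replaces A's per-entry path copies with one backtracking path and a stack of
-- remaining-neighbour lists (an alternative decomposition; return value only).

-- Shared primitive: Python's graph.get(node, []) on the dict built from the pairs.
def nbrsOf (graph : List (String × List (String × Int))) (node : String) : List (String × Int) :=
  (PySem.Dict.ofList graph).getD node []

-- all nodes that occur as a neighbour anywhere in the graph's values (termination only)
def pvUnivN (graph : List (String × List (String × Int))) : List String :=
  graph.flatMap (fun kv => kv.2.map Prod.fst)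

-- unvisited nodes among the graph's neighbours plus `extra` (termination measure)
def pvKeySet (graph : List (String × List (String × Int))) (v : PySem.Set String)
    (extra : List String) : Finset String :=
  (pvUnivN graph ++ extra).toFinset.filter (fun x => PySem.Set.contains v x = false)

-- termination lemmas and helper facts, cited by the ports' decreasing_by
theorem values_foldl (l : List (String × List (String × Int)))
    (d : PySem.Dict String (List (String × Int))) (w : List (String × Int))
    (h : w ∈ (l.foldl (fun d p => d.insert p.1 p.2) d).values) :
    w ∈ d.values ∨ ∃ p ∈ l, w = p.2 := by
  induction l generalizing d with
  | nil => exact Or.inl h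
  | cons p t ih =>
    rcases ih _ h with h' | h'
    · rcases PySem.Dict.mem_values_insert _ _ _ _ h' with rfl | h''
      · exact Or.inr ⟨p, List.mem_cons_self .., rfl⟩
      · exact Or.inl h''
    · rcases h' with ⟨q, hq, rfl⟩
      exact Or.inr ⟨q, List.mem_cons_of_mem _ hq, rfl⟩

theorem nbrs_mem_univN (graph : List (String × List (String × Int))) (node : String)
    (nb : String × Int) (h : nb ∈ nbrsOf graph node) : nb.1 ∈ pvUnivN graph := by
  unfold nbrsOf at h
  rw [PySem.Dict.getD_eq_get?_getD] at h
  rcases hg : (PySem.Dict.ofList graph).get? node with _ | w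
  · rw [hg] at h; simp at h
  · rw [hg] at h; simp at h
    have hv : w ∈ (PySem.Dict.ofList graph).values :=
      List.mem_map_of_mem (PySem.Dict.mem_items_of_get?_eq_some _ hg)
    rcases values_foldl graph PySem.Dict.empty w hv with h' | ⟨p, hp, rfl⟩
    · simp [PySem.Dict.empty, PySem.Dict.values] at h'
    · exact List.mem_flatMap.mpr ⟨p, hp, List.mem_map_of_mem h⟩

theorem contains_false_iff (v : PySem.Set String) (x : String) :
    PySem.Set.contains v x = false ↔ ¬ x ∈ v := by
  rw [← Bool.not_eq_true, not_iff_not]; exact PySem.Set.contains_iff v x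

theorem keyset_congr (graph : List (String × List (String × Int))) (v : PySem.Set String)
    (extra extra' : List String)
    (h : ∀ x, PySem.Set.contains v x = false → (x ∈ extra ↔ x ∈ extra')) :
    pvKeySet graph v extra = pvKeySet graph v extra' := by
  unfold pvKeySet
  apply Finset.ext
  intro x
  simp only [Finset.mem_filter, List.mem_toFinset, List.mem_append]
  constructor
  · rintro ⟨hx | hx, hc⟩
    exacts [⟨Or.inl hx, hc⟩, ⟨Or.inr ((h x hc).mp hx), hc⟩]
  · rintro ⟨hx | hx, hc⟩
    exacts [⟨Or.inl hx, hc⟩, ⟨Or.inr ((h x hc).mpr hx), hc⟩]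

theorem keyset_lt (graph : List (String × List (String × Int))) (v : PySem.Set String)
    (extra extra' : List String) (nb : String)
    (hmem : nb ∈ extra) (hunvis : PySem.Set.contains v nb = false)
    (hsub : ∀ x, x ∈ extra' → x ∈ pvUnivN graph ∨ x ∈ extra) :
    (pvKeySet graph (PySem.Set.add v nb) extra').card < (pvKeySet graph v extra).card := by
  apply Finset.card_lt_card
  constructor
  · intro x hx
    unfold pvKeySet at *
    simp only [Finset.mem_filter, List.mem_toFinset, List.mem_append] at *
    obtain ⟨hx1, hx2⟩ := hx
    rw [contains_false_iff] at hx2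
    rw [PySem.Set.mem_add] at hx2
    push Not at hx2
    refine ⟨?_, (contains_false_iff _ _).mpr hx2.1⟩
    rcases hx1 with hx1 | hx1
    · exact Or.inl hx1
    · exact hsub x hx1
  · intro hss
    have := hss (by
      unfold pvKeySet
      simp only [Finset.mem_filter, List.mem_toFinset, List.mem_append]
      exact ⟨Or.inr hmem, hunvis⟩)
    unfold pvKeySet at this
    simp only [Finset.mem_filter] at this
    rw [contains_false_iff, PySem.Set.mem_add] at this
    exact this.2 (Or.inr rfl)

-- ===== PORT A =====
-- A's stack (Python list, append/pop at the END) is modelled head-as-top, so the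
-- push loop over reversed(graph.get(node, [])) becomes prepending the filtered
-- neighbour frames in FORWARD order — the popped order is exactly Python's.
def aLoop (graph : List (String × List (String × Int))) (goal : String) :
    List (String × List String) → PySem.Set String → Int → Option (List String) × Int
  | [], _, count => (none, count)
  | (node, path) :: rest, visited, count =>
    if hvis : PySem.Set.contains visited node = true then
      aLoop graph goal rest visited count
    else
      let visited' := PySem.Set.add visited node
      let count' := count + 1
      if node = goal then (some path, count')
      else
        aLoop graph goal
          (((nbrsOf graph node).filter (fun nb => !(PySem.Set.contains visited' nb.1))).map
              (fun nb => (nb.1, path ++ [nb.1])) ++ rest)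
          visited' count'
termination_by stack visited _ => ((pvKeySet graph visited (stack.map Prod.fst)).card, stack.length)
decreasing_by
  · rw [keyset_congr graph visited (List.map Prod.fst rest)
        (List.map Prod.fst ((node, path) :: rest))
        (by
          intro x hc
          simp only [List.map_cons, List.mem_cons]
          constructor
          · exact Or.inr
          · rintro (rfl | hx)
            · rw [hvis] at hc; cases hc
            · exact hx)]
    exact Prod.Lex.right _ (Nat.lt_succ_self _)
  · apply Prod.Lex.left
    apply keyset_lt graph visited _ _ node
    · exact List.mem_cons_self ..
    · exact Bool.not_eq_true _ ▸ hvis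
    · intro x hx
      simp only [List.map_append, List.map_map, List.mem_append, List.mem_map,
        Function.comp] at hx
      rcases hx with ⟨nb, hnb, rfl⟩ | hx
      · exact Or.inl (nbrs_mem_univN graph node nb (List.mem_of_mem_filter hnb))
      · exact Or.inr (by
          simp only [List.map_cons, List.mem_cons, List.mem_map]
          exact Or.inr hx)

def dfs (graph : List (String × List (String × Int))) (start : String) (goal : String) :
    Option (List String) × Int :=
  aLoop graph goal [(start, [start])] PySem.Set.empty 0

-- ===== PORT B =====
-- frames = the stack of not-yet-consumed neighbour lists (Python's iterators),
-- head = top; path is the single shared path list, popped on backtracking.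
def pvMeasB (frames : List (List (String × Int))) : Nat :=
  (frames.map (fun f => f.length + 1)).sum

def bLoop (graph : List (String × List (String × Int))) (goal : String) :
    List (List (String × Int)) → List String → PySem.Set String → Int →
    Option (List String) × Int
  | [], _, _, count => (none, count)
  | [] :: fs, path, visited, count => bLoop graph goal fs path.dropLast visited count
  | (nb :: rest) :: fs, path, visited, count =>
    if hvis : PySem.Set.contains visited nb.1 = true then
      bLoop graph goal (rest :: fs) path visited count
    else
      let visited' := PySem.Set.add visited nb.1
      let count' := count + 1
      let path' := path ++ [nb.1]
      if nb.1 = goal then (some path', count')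
      else bLoop graph goal (nbrsOf graph nb.1 :: rest :: fs) path' visited' count'
termination_by frames _ visited _ =>
  ((pvKeySet graph visited (frames.flatMap (fun f => f.map Prod.fst))).card, pvMeasB frames)
decreasing_by
  · have he : List.flatMap (fun f => List.map Prod.fst f) ([] :: fs)
        = List.flatMap (fun f => List.map Prod.fst f) fs := by simp
    rw [he]
    exact Prod.Lex.right _ (by simp [pvMeasB])
  · rw [keyset_congr graph visited
        (List.flatMap (fun f => List.map Prod.fst f) (rest :: fs))
        (List.flatMap (fun f => List.map Prod.fst f) ((nb :: rest) :: fs))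
        (by
          intro x hc
          simp only [List.flatMap_cons, List.map_cons, List.cons_append, List.mem_cons]
          constructor
          · exact Or.inr
          · rintro (rfl | hx)
            · rw [hvis] at hc; cases hc
            · exact hx)]
    exact Prod.Lex.right _ (by simp only [pvMeasB, List.map_cons, List.sum_cons, List.length_cons]; omega)
  · apply Prod.Lex.left
    apply keyset_lt graph visited _ _ nb.1
    · simp
    · exact Bool.not_eq_true _ ▸ hvis
    · intro x hx
      simp only [List.flatMap_cons, List.mem_append, List.mem_map] at hx
      rcases hx with ⟨q, hq, rfl⟩ | hx
      · exact Or.inl (nbrs_mem_univN graph nb.1 q hq)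
      · simp only [List.flatMap_cons, List.map_cons, List.cons_append, List.mem_cons,
          List.mem_append]
        simp only [List.mem_map]
        rcases hx with hx | hx
        · exact Or.inr (Or.inr (Or.inl hx))
        · exact Or.inr (Or.inr (Or.inr hx))

def dfs_alt (graph : List (String × List (String × Int))) (start : String) (goal : String) :
    Option (List String) × Int :=
  let visited := PySem.Set.add PySem.Set.empty start
  if start = goal then (some [start], 1)
  else bLoop graph goal [nbrsOf graph start] [start] visited 1

-- ===== PRECONDITION & SPEC =====
def Spec_dfs (graph : List (String × List (String × Int))) (start : String) (goal : String) (out : Option (List String) × Int) : Prop := out = dfs_alt graph start goal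
instance (graph : List (String × List (String × Int))) (start : String) (goal : String) (out : Option (List String) × Int) : Decidable (Spec_dfs graph start goal out) := by unfold Spec_dfs; infer_instance

-- ===== CLAIM (what is proved, stated in full; the proofs are below) =====
def Claim_equal_dfs : Prop := ∀ (graph : List (String × List (String × Int))) (start : String) (goal : String), Dom_dfs graph start goal → Spec_dfs graph start goal (dfs graph start goal)

-- ===== LEMMAS AND PROOFS =====

-- A's live stack, reconstructed from B's state: one block per open level, each
-- block = that level's pending neighbours (filtered by the visited set at the
-- time the level's node was expanded), paired with the path they were pushed with.
def corrStack : List (List (String × Int) × PySem.Set String) → List String →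
    List (String × List String)
  | [], _ => []
  | (f, v0) :: ls, path =>
    (f.filter (fun nb => !(PySem.Set.contains v0 nb.1))).map
        (fun nb => (nb.1, path ++ [nb.1])) ++ corrStack ls path.dropLast

theorem corr_eq (graph : List (String × List (String × Int))) (goal : String)
    (levels : List (List (String × Int) × PySem.Set String)) (path : List String)
    (v : PySem.Set String) (c : Int)
    (hsub : ∀ lv ∈ levels, ∀ x, PySem.Set.contains lv.2 x = true → PySem.Set.contains v x = true) :
    aLoop graph goal (corrStack levels path) v c
      = bLoop graph goal (levels.map Prod.fst) path v c := by
  match levels with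
  | [] =>
    simp [corrStack, aLoop, bLoop]
  | ([], v0) :: ls =>
    have h1 : corrStack (([], v0) :: ls) path = corrStack ls path.dropLast := by
      simp [corrStack]
    rw [h1, List.map_cons, bLoop]
    exact corr_eq graph goal ls path.dropLast v c
      (fun lv h => hsub lv (List.mem_cons_of_mem _ h))
  | (nb :: rest, v0) :: ls =>
    have hrec : ∀ x, PySem.Set.contains v x = true →
        PySem.Set.contains (PySem.Set.add v nb.1) x = true := by
      intro x hx
      rw [PySem.Set.contains_iff] at hx ⊢
      exact (PySem.Set.mem_add _ _ _).mpr (Or.inl hx)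
    by_cases hv0 : PySem.Set.contains v0 nb.1 = true
    · have hv : PySem.Set.contains v nb.1 = true :=
        hsub _ (List.mem_cons_self ..) _ hv0
      have hm0 : nb.1 ∈ v0 := (PySem.Set.contains_iff _ _).mp hv0
      have h1 : corrStack ((nb :: rest, v0) :: ls) path
          = corrStack ((rest, v0) :: ls) path := by
        simp [corrStack, hm0]
      rw [h1, List.map_cons, bLoop, dif_pos hv]
      exact corr_eq graph goal ((rest, v0) :: ls) path v c
        (fun lv h => by
          rcases List.mem_cons.mp h with rfl | h'
          · exact hsub (nb :: rest, v0) (List.mem_cons_self ..)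
          · exact hsub lv (List.mem_cons_of_mem _ h'))
    · have hm0 : ¬ nb.1 ∈ v0 := fun hm => hv0 ((PySem.Set.contains_iff _ _).mpr hm)
      have h1 : corrStack ((nb :: rest, v0) :: ls) path
          = (nb.1, path ++ [nb.1]) :: corrStack ((rest, v0) :: ls) path := by
        simp [corrStack, hm0]
      rw [h1, List.map_cons, aLoop, bLoop]
      by_cases hv : PySem.Set.contains v nb.1 = true
      · rw [dif_pos hv, dif_pos hv]
        exact corr_eq graph goal ((rest, v0) :: ls) path v c
          (fun lv h => by
            rcases List.mem_cons.mp h with rfl | h'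
            · exact hsub (nb :: rest, v0) (List.mem_cons_self ..)
            · exact hsub lv (List.mem_cons_of_mem _ h'))
      · rw [dif_neg hv, dif_neg hv]
        by_cases hg : nb.1 = goal
        · simp [hg]
        · simp only [if_neg hg]
          have h2 : ((nbrsOf graph nb.1).filter
                (fun q => !(PySem.Set.contains (PySem.Set.add v nb.1) q.1))).map
                  (fun q => (q.1, (path ++ [nb.1]) ++ [q.1]))
                ++ corrStack ((rest, v0) :: ls) path
              = corrStack ((nbrsOf graph nb.1, PySem.Set.add v nb.1) :: (rest, v0) :: ls)
                  (path ++ [nb.1]) := by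
            simp [corrStack]
          rw [h2]
          have := corr_eq graph goal
            ((nbrsOf graph nb.1, PySem.Set.add v nb.1) :: (rest, v0) :: ls)
            (path ++ [nb.1]) (PySem.Set.add v nb.1) (c + 1)
            (fun lv h => by
              rcases List.mem_cons.mp h with rfl | h'
              · exact fun x hx => hx
              · rcases List.mem_cons.mp h' with rfl | h''
                · exact fun x hx => hrec x (hsub (nb :: rest, v0) (List.mem_cons_self ..) x hx)
                · exact fun x hx => hrec x (hsub lv (List.mem_cons_of_mem _ h'') x hx))
          rw [List.map_cons, List.map_cons] at this
          exact this
termination_by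
  ((pvKeySet graph v ((levels.map Prod.fst).flatMap (fun f => f.map Prod.fst))).card,
   pvMeasB (levels.map Prod.fst))
decreasing_by
  · have he : List.flatMap (fun f => List.map Prod.fst f) (List.map Prod.fst ls)
        = List.flatMap (fun f => List.map Prod.fst f) (List.map Prod.fst (([], v0) :: ls)) := by
      simp
    rw [he]
    exact Prod.Lex.right _ (by simp [pvMeasB])
  · rw [keyset_congr graph v
        (List.flatMap (fun f => List.map Prod.fst f) (List.map Prod.fst ((rest, v0) :: ls)))
        (List.flatMap (fun f => List.map Prod.fst f) (List.map Prod.fst ((nb :: rest, v0) :: ls)))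
        (by
          intro x hc
          simp only [List.map_cons, List.flatMap_cons, List.cons_append, List.mem_cons]
          constructor
          · exact Or.inr
          · rintro (rfl | hx)
            · rw [hv] at hc; cases hc
            · exact hx)]
    exact Prod.Lex.right _
      (by simp only [pvMeasB, List.map_cons, List.sum_cons, List.length_cons]; omega)
  · rw [keyset_congr graph v
        (List.flatMap (fun f => List.map Prod.fst f) (List.map Prod.fst ((rest, v0) :: ls)))
        (List.flatMap (fun f => List.map Prod.fst f) (List.map Prod.fst ((nb :: rest, v0) :: ls)))
        (by
          intro x hc
          simp only [List.map_cons, List.flatMap_cons, List.cons_append, List.mem_cons]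
          constructor
          · exact Or.inr
          · rintro (rfl | hx)
            · rw [hv] at hc; cases hc
            · exact hx)]
    exact Prod.Lex.right _
      (by simp only [pvMeasB, List.map_cons, List.sum_cons, List.length_cons]; omega)
  · apply Prod.Lex.left
    apply keyset_lt graph v _ _ nb.1
    · simp
    · exact Bool.not_eq_true _ ▸ hv
    · intro x hx
      simp only [List.map_cons, List.flatMap_cons, List.mem_append, List.mem_map] at hx
      rcases hx with ⟨q, hq, rfl⟩ | hx
      · exact Or.inl (nbrs_mem_univN graph nb.1 q hq)
      · simp only [List.map_cons, List.flatMap_cons, List.cons_append, List.mem_cons,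
          List.mem_append, List.mem_map]
        rcases hx with hx | hx
        · exact Or.inr (Or.inr (Or.inl hx))
        · exact Or.inr (Or.inr (Or.inr hx))

-- ===== VERDICT (by name: the statement is the Claim_ definition above) =====
theorem dfs_spec : Claim_equal_dfs := by
  intro graph start goal _hdom
  unfold Spec_dfs dfs dfs_alt
  have hc : ¬ PySem.Set.contains PySem.Set.empty start = true := by
    simp [PySem.Set.empty, PySem.Set.contains]
  rw [aLoop, dif_neg hc]
  by_cases hg : start = goal
  · simp [hg]
  · simp only [if_neg hg]
    have h0 : (0 : Int) + 1 = 1 := rfl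
    rw [h0]
    have h1 : ((nbrsOf graph start).filter
          (fun nb => !(PySem.Set.contains (PySem.Set.add PySem.Set.empty start) nb.1))).map
            (fun nb => (nb.1, [start] ++ [nb.1])) ++ ([] : List (String × List String))
        = corrStack [(nbrsOf graph start, PySem.Set.add PySem.Set.empty start)] [start] := by
      simp [corrStack]
    rw [h1]
    have := corr_eq graph goal
      [(nbrsOf graph start, PySem.Set.add PySem.Set.empty start)] [start]
      (PySem.Set.add PySem.Set.empty start) 1
      (fun lv h => by rcases List.mem_cons.mp h with rfl | h' <;> simp_all)
    rw [List.map_cons, List.map_nil] at this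
    exact this
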